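-- pv_equiv track=rewrite | github.com/BBoonZ/PSCP-ejudge | PSCP-MID/Solar System.py | find_h
-- ===== SOURCE A (Python) =====
-- def find_h(text, f_sun):
--     """hot hot"""
--     hot_1 = hot_2 = ''
--     count = 0
--     for i in range(len(text)):
--         if text[i].isspace():
--             count += 1
--         elif count == f_sun-1:
--             hot_1 += text[i]
--         elif count == f_sun+1:
--             hot_2 += text[i]
--     return hot_1, hot_2
-- ===== SOURCE B (Python) =====
-- def find_h(text, f_sun):
--     """hot hot"""
--     groups = {}
--     count = 0
--     for ch in text:
--         if ch.isspace():
--             count += 1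
--         else:
--             groups.setdefault(count, []).append(ch)
--     return ''.join(groups.get(f_sun - 1, [])), ''.join(groups.get(f_sun + 1, []))
-- ===== Notes on version B (the rewrite author's own statement) =====
-- stated objective: alternative
-- what changed: Instead of branching on f_sun-1/f_sun+1 inside the loop, B groups all non-space characters into a dict keyed by the running whitespace count and reads the two columns off the dict after the loop.
import Mathlib
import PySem

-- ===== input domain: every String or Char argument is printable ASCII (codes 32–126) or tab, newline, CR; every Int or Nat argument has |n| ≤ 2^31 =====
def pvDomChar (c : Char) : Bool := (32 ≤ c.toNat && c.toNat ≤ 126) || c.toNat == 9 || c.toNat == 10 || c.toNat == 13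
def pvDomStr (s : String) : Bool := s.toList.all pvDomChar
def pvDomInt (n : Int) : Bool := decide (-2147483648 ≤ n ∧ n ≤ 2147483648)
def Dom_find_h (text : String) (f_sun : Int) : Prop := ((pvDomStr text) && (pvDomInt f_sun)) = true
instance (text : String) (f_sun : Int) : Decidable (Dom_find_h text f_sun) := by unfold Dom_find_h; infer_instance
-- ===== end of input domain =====

-- ===== PORT A =====
-- B differs by grouping into a dict keyed by running whitespace count; A branches on f_sun inside the loop.
def stepA (f_sun : Int) (st : List Char × List Char × Int) (c : Char) : List Char × List Char × Int :=
  if PySem.Chars.isspace c then (st.1, st.2.1, st.2.2 + 1)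
  else if st.2.2 == f_sun - 1 then (st.1 ++ [c], st.2.1, st.2.2)
  else if st.2.2 == f_sun + 1 then (st.1, st.2.1 ++ [c], st.2.2)
  else st

def find_h (text : String) (f_sun : Int) : String × String :=
  let r := text.toList.foldl (stepA f_sun) ([], [], 0)
  (String.ofList r.1, String.ofList r.2.1)

-- ===== PORT B =====
def stepB (st : PySem.Dict Int (List Char) × Int) (c : Char) : PySem.Dict Int (List Char) × Int :=
  if PySem.Chars.isspace c then (st.1, st.2 + 1)
  else (st.1.modify st.2 [] (· ++ [c]), st.2)

def find_h_alt (text : String) (f_sun : Int) : String × String :=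
  let r := text.toList.foldl stepB (PySem.Dict.empty, 0)
  (String.ofList (r.1.getD (f_sun - 1) []), String.ofList (r.1.getD (f_sun + 1) []))

-- ===== PRECONDITION & SPEC =====
def Spec_find_h (text : String) (f_sun : Int) (out : String × String) : Prop := out = find_h_alt text f_sun
instance (text : String) (f_sun : Int) (out : String × String) : Decidable (Spec_find_h text f_sun out) := by unfold Spec_find_h; infer_instance

-- ===== CLAIM (what is proved, stated in full; the proofs are below) =====
def Claim_equal_find_h : Prop := ∀ (text : String) (f_sun : Int), Dom_find_h text f_sun → Spec_find_h text f_sun (find_h text f_sun)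

-- ===== LEMMAS AND PROOFS =====

-- ===== VERDICT (by name: the statement is the Claim_ definition above) =====
lemma loop_rel (f : Int) (xs : List Char) : ∀ (c : Int) (d : PySem.Dict Int (List Char)),
    (xs.foldl (stepA f) (d.getD (f - 1) [], d.getD (f + 1) [], c)).1
      = ((xs.foldl stepB (d, c)).1.getD (f - 1) []) ∧
    (xs.foldl (stepA f) (d.getD (f - 1) [], d.getD (f + 1) [], c)).2.1
      = ((xs.foldl stepB (d, c)).1.getD (f + 1) []) := by
  induction xs with
  | nil => intro c d; exact ⟨rfl, rfl⟩
  | cons x xs ih =>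
    intro c d
    simp only [List.foldl_cons]
    by_cases hs : PySem.Chars.isspace x = true
    · simp only [stepA, stepB, hs]
      exact ih (c + 1) d
    · simp only [stepA, stepB, hs, Bool.false_eq_true, if_false]
      by_cases hc1 : c = f - 1
      · subst hc1
        have e1 : (d.modify (f-1) [] (· ++ [x])).getD (f-1) [] = d.getD (f-1) [] ++ [x] := by
          rw [PySem.Dict.getD_modify, if_pos rfl]
        have e2 : (d.modify (f-1) [] (· ++ [x])).getD (f+1) [] = d.getD (f+1) [] := by
          rw [PySem.Dict.getD_modify, if_neg (by omega)]
        simpa [e1, e2, beq_iff_eq] using ih (f-1) (d.modify (f-1) [] (· ++ [x]))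
      · by_cases hc2 : c = f + 1
        · subst hc2
          have e1 : (d.modify (f+1) [] (· ++ [x])).getD (f-1) [] = d.getD (f-1) [] := by
            rw [PySem.Dict.getD_modify, if_neg (by omega)]
          have e2 : (d.modify (f+1) [] (· ++ [x])).getD (f+1) [] = d.getD (f+1) [] ++ [x] := by
            rw [PySem.Dict.getD_modify, if_pos rfl]
          simpa [e1, e2, beq_iff_eq, show f + 1 ≠ f - 1 by omega] using
            ih (f+1) (d.modify (f+1) [] (· ++ [x]))
        · have e1 : (d.modify c [] (· ++ [x])).getD (f-1) [] = d.getD (f-1) [] := by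
            rw [PySem.Dict.getD_modify, if_neg (fun h => hc1 h.symm)]
          have e2 : (d.modify c [] (· ++ [x])).getD (f+1) [] = d.getD (f+1) [] := by
            rw [PySem.Dict.getD_modify, if_neg (fun h => hc2 h.symm)]
          simpa [e1, e2, beq_iff_eq, hc1, hc2] using ih c (d.modify c [] (· ++ [x]))

theorem find_h_spec : Claim_equal_find_h := by
  intro text f_sun _
  unfold Spec_find_h find_h find_h_alt
  have h := loop_rel f_sun text.toList 0 PySem.Dict.empty
  simp only [PySem.Dict.getD_empty] at h
  simp only [h.1, h.2]
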